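-- pv_equiv track=rewrite | github.com/TKV-LF/leetcode | 66. Plus one/index.py | plusOne
-- ===== SOURCE A (Python) =====
-- from typing import List
--
-- def plusOne(digits: List[int]) -> List[int]:
--     result = []
--     temp = 0
--     if (digits[len(digits) - 1] + 1) > 9:
--         temp = 1
--         result.append(0)
--         if len(digits) == 1:
--             result.insert(0, 1)
--     else:
--         result.append(digits[len(digits) - 1] + 1)
--     for i in range(len(digits) - 2, -1, -1):
--         if temp != 0:
--             if (digits[i] + temp) > 9:
--                 temp = 1
--                 result.insert(0, 0)
--                 if i == 0:
--                     result.insert(0, 1)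
--
--             else:
--                 result.insert(0, digits[i] + temp)
--                 temp = 0
--         else:
--             result.insert(0, digits[i])
--
--     return result
-- ===== SOURCE B (Python) =====
-- def plusOne(digits):
--     n = len(digits)
--     j = n - 1
--     while j >= 0 and digits[j] >= 9:
--         j -= 1
--     if j < 0:
--         return [1] + [0] * n
--     return digits[:j] + [digits[j] + 1] + [0] * (n - 1 - j)
-- ===== Notes on version B (the rewrite author's own statement) =====
-- stated objective: faster
-- what changed: B scans once from the end for the last digit below 9 (the pivot) and then constructs the answer directly as prefix-slice + incremented pivot + a block of zeros, instead of A's per-digit carry state machine that emits digits one by one with insert(0,...)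
import Mathlib
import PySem

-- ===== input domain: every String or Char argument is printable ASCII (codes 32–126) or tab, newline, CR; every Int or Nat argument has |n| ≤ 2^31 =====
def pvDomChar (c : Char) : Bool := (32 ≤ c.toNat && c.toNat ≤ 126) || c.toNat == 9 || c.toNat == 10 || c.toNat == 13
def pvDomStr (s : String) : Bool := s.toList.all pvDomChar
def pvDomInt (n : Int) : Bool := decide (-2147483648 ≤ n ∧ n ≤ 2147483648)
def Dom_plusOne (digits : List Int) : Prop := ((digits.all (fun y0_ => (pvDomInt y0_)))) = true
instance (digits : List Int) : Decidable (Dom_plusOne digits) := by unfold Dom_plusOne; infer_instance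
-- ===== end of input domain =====

-- B finds the last digit below 9 and builds the answer by slicing (prefix + pivot+1 + zeros),
-- replacing A's per-digit carry state machine with quadratic insert(0,...) (objective: faster).

-- ===== PORT A =====
-- loop body of A's for-loop (state = (result, temp))
def stepA (digits : List Int) (st : List Int × Int) (i : Int) : List Int × Int :=
  if st.2 ≠ 0 then
    if (PySem.List.pyGet? digits i).getD 0 + st.2 > 9 then
      (if i == 0 then 1 :: 0 :: st.1 else 0 :: st.1, 1)
    else (((PySem.List.pyGet? digits i).getD 0 + st.2) :: st.1, 0)
  else ((PySem.List.pyGet? digits i).getD 0 :: st.1, st.2)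

-- digits[len-1] is read via pyGet?; Pre_ excludes the empty list where Python raises IndexError
def plusOne (digits : List Int) : List Int :=
  ((PySem.List.pyRange ((digits.length : Int) - 2) (-1) (-1)).foldl (stepA digits)
    (if (PySem.List.pyGet? digits ((digits.length : Int) - 1)).getD 0 + 1 > 9 then
       (if digits.length == 1 then ([1, 0] : List Int) else [0], (1 : Int))
     else ([(PySem.List.pyGet? digits ((digits.length : Int) - 1)).getD 0 + 1], 0))).1

-- ===== PORT B =====
-- B's while loop 'j = n-1; while j >= 0 and digits[j] >= 9: j -= 1', recursing on k = j+1
def bFind (digits : List Int) : Nat → Int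
  | 0 => -1
  | k + 1 =>
    if 9 ≤ (PySem.List.pyGet? digits ((k : Nat) : Int)).getD 0 then bFind digits k
    else ((k : Nat) : Int)

-- digits[:j] is PySem.List.slice; [0]*(n-1-j) is replicate (exact: n-1-j ≥ 0 in that branch)
def plusOne_alt (digits : List Int) : List Int :=
  let j := bFind digits digits.length
  if j < 0 then 1 :: List.replicate digits.length 0
  else
    PySem.List.slice digits none (some j)
      ++ ((PySem.List.pyGet? digits j).getD 0 + 1)
      :: List.replicate ((digits.length : Int) - 1 - j).toNat 0

-- ===== PRECONDITION & SPEC =====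
-- Pre_ excludes only the empty list, on which Python A raises IndexError.
def Pre_plusOne (digits : List Int) : Prop := digits ≠ []
instance (digits : List Int) : Decidable (Pre_plusOne digits) := by unfold Pre_plusOne; infer_instance
def pvWitness_plusOne : List Int := ([9, 9])

def Spec_plusOne (digits : List Int) (out : List Int) : Prop := out = plusOne_alt digits
instance (digits : List Int) (out : List Int) : Decidable (Spec_plusOne digits out) := by unfold Spec_plusOne; infer_instance

-- ===== CLAIM (what is proved, stated in full; the proofs are below) =====
def Claim_equal_plusOne : Prop := ∀ (digits : List Int), Dom_plusOne digits → Pre_plusOne digits → Spec_plusOne digits (plusOne digits)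

-- ===== LEMMAS AND PROOFS =====

-- result digits (in reversed order, final carry included) of a right-to-left carry pass:
-- the common characterisation both ports are reduced to
def goB : List Int → Int → List Int
  | [], c => if c ≠ 0 then [1] else []
  | d :: rest, c =>
    if c ≠ 0 then
      if d + 1 > 9 then 0 :: goB rest c else (d + 1) :: goB rest 0
    else d :: goB rest c

-- A's loop, recast on the reversed remaining digits (rest = [] ↔ index i = 0)
def goA : List Int → Int → List Int → List Int
  | [], _, acc => acc
  | d :: rest, c, acc =>
    if c ≠ 0 then
      if d + c > 9 then goA rest 1 (if rest = [] then 1 :: 0 :: acc else 0 :: acc)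
      else goA rest 0 ((d + c) :: acc)
    else goA rest c (d :: acc)

lemma alt_def (digits : List Int) :
    plusOne_alt digits =
      if bFind digits digits.length < 0 then 1 :: List.replicate digits.length 0
      else
        PySem.List.slice digits none (some (bFind digits digits.length))
          ++ ((PySem.List.pyGet? digits (bFind digits digits.length)).getD 0 + 1)
          :: List.replicate ((digits.length : Int) - 1 - bFind digits digits.length).toNat 0 := rfl

lemma goB_zero : ∀ rest : List Int, goB rest 0 = rest := by
  intro rest
  induction rest with
  | nil => rfl
  | cons d r ih => simp [goB, ih]

lemma bFind_lt (digits : List Int) : ∀ k : Nat, bFind digits k < (k : Int) := by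
  intro k
  induction k with
  | zero => simp [bFind]
  | succ k ih =>
    rw [bFind]
    split_ifs with h
    · exact lt_trans ih (by push_cast; omega)
    · push_cast; omega

lemma bFind_append (xs ys : List Int) : ∀ k : Nat, k ≤ xs.length → bFind (xs ++ ys) k = bFind xs k := by
  intro k
  induction k with
  | zero => intro _; rfl
  | succ k ih =>
    intro h
    have hk : k < xs.length := h
    rw [bFind, bFind, PySem.List.pyGet?_natCast, PySem.List.pyGet?_natCast,
        List.getElem?_append_left hk, ih (Nat.le_of_lt hk)]

-- B equals the reversed carry-pass characterisation
lemma bkey : ∀ rd : List Int, plusOne_alt rd.reverse = (goB rd 1).reverse := by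
  intro rd
  induction rd with
  | nil => decide
  | cons d rest ih =>
    have hrev : (d :: rest).reverse = rest.reverse ++ [d] := by simp
    have hlen : (rest.reverse ++ [d]).length = rest.length + 1 := by simp
    have hlast : (PySem.List.pyGet? (rest.reverse ++ [d]) ((rest.length : Nat) : Int)).getD 0 = d := by
      rw [PySem.List.pyGet?_natCast]
      have : (rest.reverse ++ [d])[rest.length]? = some d := by
        rw [List.getElem?_append_right (by simp)]
        simp
      rw [this]; rfl
    rw [hrev]
    by_cases h9 : 9 ≤ d
    · -- carry continues: strip d (≥ 9), recurse
      have hfind : bFind (rest.reverse ++ [d]) (rest.length + 1)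
          = bFind rest.reverse rest.length := by
        rw [bFind, hlast, if_pos h9, bFind_append _ _ _ (by simp)]
      have hgb : goB (d :: rest) 1 = 0 :: goB rest 1 := by
        rw [goB, if_pos (by norm_num), if_pos (by omega)]
      rw [hgb]
      rw [alt_def] at ih ⊢
      rw [List.length_reverse] at ih
      rw [hlen, hfind]
      set j := bFind rest.reverse rest.length with hj
      have hjlt : j < (rest.length : Int) := bFind_lt _ _
      by_cases hneg : j < 0
      · rw [if_pos hneg] at ih ⊢
        rw [List.replicate_succ', List.reverse_cons, ← ih]
        simp
      · rw [if_neg hneg] at ih ⊢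
        rw [not_lt] at hneg
        have hjn : j.toNat < rest.length := by omega
        have hslice : PySem.List.slice (rest.reverse ++ [d]) none (some j)
            = PySem.List.slice rest.reverse none (some j) := by
          rw [PySem.List.slice_to _ hneg, PySem.List.slice_to _ hneg,
              List.take_append_of_le_length (by simp; omega)]
        have hget : PySem.List.pyGet? (rest.reverse ++ [d]) j = PySem.List.pyGet? rest.reverse j := by
          have hcast : j = ((j.toNat : Nat) : Int) := by omega
          rw [hcast, PySem.List.pyGet?_natCast, PySem.List.pyGet?_natCast,
              List.getElem?_append_left (by simp; omega)]
        have hrep : (((rest.length + 1 : Nat) : Int) - 1 - j).toNat = ((rest.length : Int) - 1 - j).toNat + 1 := by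
          omega
        rw [hslice, hget, hrep, List.replicate_succ', List.reverse_cons, ← ih]
        simp
    · -- pivot is d itself
      have hfind : bFind (rest.reverse ++ [d]) (rest.length + 1) = (rest.length : Int) := by
        rw [bFind, hlast, if_neg h9]
      have hgb : goB (d :: rest) 1 = (d + 1) :: rest := by
        rw [goB, if_pos (by norm_num), if_neg (by omega), goB_zero]
      rw [hgb]
      rw [alt_def, hlen, hfind, if_neg (by omega)]
      rw [PySem.List.slice_to_natCast, hlast]
      have h0 : (((rest.length + 1 : Nat) : Int) - 1 - (rest.length : Int)).toNat = 0 := by omega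
      rw [h0, List.take_append_of_le_length (by simp)]
      simp

lemma alt_eq_goB (digits : List Int) :
    plusOne_alt digits = (goB digits.reverse 1).reverse := by
  have h := bkey digits.reverse
  rwa [List.reverse_reverse] at h

lemma goA_eq_goB (rd : List Int) : ∀ (c : Int) (acc : List Int),
    (c = 0 ∨ (c = 1 ∧ rd ≠ [])) →
    goA rd c acc = (goB rd c).reverse ++ acc := by
  induction rd with
  | nil =>
    intro c acc hc
    rcases hc with h | ⟨_, h⟩
    · simp [goA, goB, h]
    · exact absurd rfl h
  | cons d rest ih =>
    intro c acc hc
    rcases hc with h | ⟨h, _⟩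
    · subst h
      simp only [goA, goB, if_neg (by simp : ¬ ((0 : Int) ≠ 0))]
      rw [ih 0 _ (Or.inl rfl)]; simp
    · subst h
      by_cases h9 : d + 1 > 9
      · simp only [goA, goB, if_pos (by norm_num : ((1 : Int) ≠ 0)), if_pos h9]
        rcases eq_or_ne rest [] with hr | hr
        · subst hr; simp [goA, goB]
        · rw [if_neg hr, ih 1 _ (Or.inr ⟨rfl, hr⟩)]; simp
      · simp only [goA, goB, if_pos (by norm_num : ((1 : Int) ≠ 0)), if_neg h9]
        rw [ih 0 _ (Or.inl rfl)]; simp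

lemma loopA_goA (digits : List Int) (hne : digits ≠ []) :
    ∀ (k : Nat), k < digits.length → ∀ (acc : List Int) (c : Int),
    (List.foldl (stepA digits) (acc, c) (PySem.List.pyRange ((k : Int) - 1) (-1) (-1))).1
      = goA ((digits.take k).reverse) c acc := by
  intro k
  induction k with
  | zero =>
    intro _ acc c
    rw [PySem.List.pyRange_neg_one_eq_nil (by norm_num)]
    simp [goA]
  | succ k ih =>
    intro hk acc c
    have hk' : k < digits.length := Nat.lt_of_succ_lt hk
    have hcast : ((k + 1 : Nat) : Int) - 1 = (k : Int) := by push_cast; ring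
    rw [hcast, PySem.List.pyRange_neg_one_cons (by omega), List.foldl_cons]
    have hd : (PySem.List.pyGet? digits ((k : Nat) : Int)).getD 0 = digits[k] := by
      rw [PySem.List.pyGet?_natCast, List.getElem?_eq_getElem hk']; rfl
    have htake : (digits.take (k + 1)).reverse = digits[k] :: (digits.take k).reverse := by
      rw [List.take_add_one, List.getElem?_eq_getElem hk']; simp
    rw [htake]
    simp only [stepA, goA, hd]
    by_cases hcne : c ≠ 0
    · simp only [if_pos hcne]
      by_cases h9 : digits[k] + c > 9
      · simp only [if_pos h9]
        by_cases hk0 : k = 0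
        · subst hk0
          rw [if_pos (by simp), if_pos (by simp)]
          exact ih (by omega) _ 1
        · rw [if_neg (by simpa using hk0),
              if_neg (by simp [List.take_eq_nil_iff]; tauto)]
          exact ih hk' _ 1
      · simp only [if_neg h9]
        exact ih hk' _ 0
    · simp only [if_neg hcne]
      exact ih hk' _ c

-- ===== VERDICT (by name: the statement is the Claim_ definition above) =====
theorem plusOne_spec : Claim_equal_plusOne := by
  intro digits _ hpre
  unfold Spec_plusOne
  rw [alt_eq_goB]
  have hlen : 0 < digits.length := List.length_pos_of_ne_nil hpre
  rcases Nat.lt_or_ge 1 digits.length with h2 | h1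
  · -- at least two digits
    have hidx : digits.length - 1 < digits.length := by omega
    have hlast : (PySem.List.pyGet? digits ((digits.length : Int) - 1)).getD 0
        = digits[digits.length - 1] := by
      have hc : ((digits.length : Int) - 1) = ((digits.length - 1 : Nat) : Int) := by omega
      rw [hc, PySem.List.pyGet?_natCast, List.getElem?_eq_getElem hidx]; rfl
    have hrev : digits.reverse
        = digits[digits.length - 1] :: (digits.take (digits.length - 1)).reverse := by
      conv_lhs => rw [← List.dropLast_append_getLast hpre]
      rw [List.dropLast_eq_take, List.getLast_eq_getElem]
      simp
    have hrange : ((digits.length : Int) - 2) = ((digits.length - 1 : Nat) : Int) - 1 := by omega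
    have htne : (digits.take (digits.length - 1)).reverse ≠ [] := by
      simp [List.take_eq_nil_iff]
      constructor
      · omega
      · exact hpre
    unfold plusOne
    rw [hlast, hrange, hrev]
    by_cases h9 : digits[digits.length - 1] + 1 > 9
    · rw [if_pos h9, if_neg (by simpa using (by omega : digits.length ≠ 1)),
          loopA_goA digits hpre _ (by omega),
          goA_eq_goB _ 1 _ (Or.inr ⟨rfl, htne⟩)]
      simp [goB, h9]
    · rw [if_neg h9, loopA_goA digits hpre _ (by omega),
          goA_eq_goB _ 0 _ (Or.inl rfl)]
      simp [goB, h9]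
  · -- exactly one digit
    obtain ⟨d, hd⟩ : ∃ d, digits = [d] := by
      match digits, hlen, h1 with
      | [d], _, _ => exact ⟨d, rfl⟩
    subst hd
    unfold plusOne
    rw [PySem.List.pyRange_neg_one_eq_nil (by norm_num)]
    by_cases h9 : d + 1 > 9
    · simp [goB, PySem.List.pyGet?, PySem.List.pyIdx?, h9]
    · simp [goB, PySem.List.pyGet?, PySem.List.pyIdx?, h9]
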